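-- pv_equiv track=rewrite | github.com/Cl3m51/QR-Code | codefinal.py | convert_ascii
-- ===== SOURCE A (Python) =====
-- def convert_ascii(l):
--     b = ''
--     for i in l:
--         b1 = '0'
--         h = ''.join(hex(ord(i))[2:])
--         j = bin(int(h,16))[2:]
--         k = 8-len(j)
--         b += k*b1 + j
--     return b
-- ===== SOURCE B (Python) =====
-- def convert_ascii(l):
--     out = []
--     for i in l:
--         n = ord(i)
--         bits = ''
--         while n > 0:
--             bits = str(n % 2) + bits
--             n //= 2
--         if bits == '':
--             bits = '0'
--         out.append(bits.zfill(8))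
--     return ''.join(out)
-- ===== Notes on version B (the rewrite author's own statement) =====
-- stated objective: alternative
-- what changed: Replaces the per-char hex()/int(.,16)/bin() library round-trip with a hand-rolled repeated-division bit loop plus zfill(8), accumulating parts in a list joined once instead of repeated string +=.
import Mathlib
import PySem

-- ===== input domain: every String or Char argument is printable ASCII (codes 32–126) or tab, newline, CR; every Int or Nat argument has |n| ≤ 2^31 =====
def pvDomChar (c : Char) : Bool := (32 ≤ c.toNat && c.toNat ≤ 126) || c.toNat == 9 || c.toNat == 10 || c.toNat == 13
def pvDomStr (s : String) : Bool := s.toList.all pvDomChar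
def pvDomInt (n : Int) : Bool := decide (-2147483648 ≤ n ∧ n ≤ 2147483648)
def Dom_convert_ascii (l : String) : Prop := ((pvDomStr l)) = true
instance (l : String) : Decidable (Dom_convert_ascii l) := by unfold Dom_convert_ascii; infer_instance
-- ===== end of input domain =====

-- B replaces A's hex()/int(.,16)/bin() library round-trip by a hand-rolled
-- repeated-division bit loop with zfill(8) (alternative decomposition, same cost).

-- ===== PORT A =====
-- hex digits of n (hand port of Python's hex(n)[2:] for n ≥ 0; exact on Nat)
def pvHexDigit (m : Nat) : Char :=
  if m < 10 then Char.ofNat (48 + m) else Char.ofNat (87 + m)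

def pvHexDigits : Nat → List Char
  | 0 => []
  | n+1 => pvHexDigits ((n+1) / 16) ++ [pvHexDigit ((n+1) % 16)]
decreasing_by exact Nat.div_lt_self (Nat.succ_pos n) (by norm_num)

-- Python hex(n)[2:] : '0' for 0, digits otherwise
def pvHexStr (n : Nat) : List Char := if n = 0 then ['0'] else pvHexDigits n

-- value of one hex digit char (hand port of int(h,16)'s digit reading; exact on hex digits)
def pvHexVal (c : Char) : Nat :=
  if c.toNat ≥ 97 then c.toNat - 87 else c.toNat - 48

-- int(h,16) on a digit string produced by hex()
def pvHexToNat (h : List Char) : Nat := h.foldl (fun a c => 16 * a + pvHexVal c) 0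

-- bin(n)[2:] digits (hand port, exact on Nat)
def pvBinDigits : Nat → List Char
  | 0 => []
  | n+1 => pvBinDigits ((n+1) / 2) ++ [if (n+1) % 2 = 1 then '1' else '0']
decreasing_by exact Nat.div_lt_self (Nat.succ_pos n) (by norm_num)

def pvBinStr (n : Nat) : List Char := if n = 0 then ['0'] else pvBinDigits n

def convert_ascii (l : String) : String :=
  String.mk (l.toList.foldl (fun b i =>
    let h := pvHexStr i.toNat
    let j := pvBinStr (pvHexToNat h)
    let k := 8 - j.length
    b ++ List.replicate k '0' ++ j) [])

-- ===== PORT B =====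
-- Source B's while-loop: prepend n%2 while n>0
def pvBinLoop : Nat → List Char → List Char
  | 0, acc => acc
  | n+1, acc => pvBinLoop ((n+1) / 2) ((if (n+1) % 2 = 1 then '1' else '0') :: acc)
decreasing_by exact Nat.div_lt_self (Nat.succ_pos n) (by norm_num)

def pvBitsOf (n : Nat) : List Char :=
  let bits := pvBinLoop n []
  if bits = [] then ['0'] else bits

-- bits.zfill(8): pad on the left to length 8 (bits never starts with a sign here)
def pvZfill8 (s : List Char) : List Char := List.replicate (8 - s.length) '0' ++ s

def convert_ascii_alt (l : String) : String :=
  String.mk ((l.toList.foldl (fun out i => out ++ [pvZfill8 (pvBitsOf i.toNat)]) []).flatten)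

-- ===== PRECONDITION & SPEC =====
def Spec_convert_ascii (l : String) (out : String) : Prop := out = convert_ascii_alt l
instance (l : String) (out : String) : Decidable (Spec_convert_ascii l out) := by unfold Spec_convert_ascii; infer_instance

-- ===== CLAIM (what is proved, stated in full; the proofs are below) =====
def Claim_equal_convert_ascii : Prop := ∀ (l : String), Dom_convert_ascii l → Spec_convert_ascii l (convert_ascii l)

-- ===== LEMMAS AND PROOFS =====

theorem pvHexVal_pvHexDigit (m : Nat) (h : m < 16) : pvHexVal (pvHexDigit m) = m := by
  interval_cases m <;> decide

theorem pvHexToNat_pvHexDigits (n : Nat) : pvHexToNat (pvHexDigits n) = n := by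
  induction n using pvHexDigits.induct with
  | case1 => simp [pvHexDigits, pvHexToNat]
  | case2 n ih =>
    rw [pvHexDigits]
    unfold pvHexToNat at *
    rw [List.foldl_append, ih]
    simp only [List.foldl]
    rw [pvHexVal_pvHexDigit _ (Nat.mod_lt _ (by norm_num))]
    omega

theorem pvHexToNat_pvHexStr (n : Nat) : pvHexToNat (pvHexStr n) = n := by
  unfold pvHexStr
  split
  · subst n; decide
  · exact pvHexToNat_pvHexDigits n

theorem pvBinLoop_eq (n : Nat) : ∀ acc, pvBinLoop n acc = pvBinDigits n ++ acc := by
  induction n using pvBinDigits.induct with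
  | case1 => intro acc; rw [pvBinLoop, pvBinDigits]; rfl
  | case2 n ih =>
    intro acc
    rw [pvBinLoop, pvBinDigits, ih]
    simp

theorem pvBinDigits_ne_nil (n : Nat) (h : n ≠ 0) : pvBinDigits n ≠ [] := by
  cases n with
  | zero => exact absurd rfl h
  | succ n => rw [pvBinDigits]; simp

theorem pvBitsOf_eq (n : Nat) : pvBitsOf n = pvBinStr n := by
  unfold pvBitsOf pvBinStr
  rw [pvBinLoop_eq, List.append_nil]
  by_cases h : n = 0
  · subst n; simp [pvBinDigits]
  · simp [pvBinDigits_ne_nil n h, h]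

theorem flatten_foldl (g : Char → List Char) (xs : List Char) :
    ∀ acc : List (List Char),
      (xs.foldl (fun out i => out ++ [g i]) acc).flatten
        = xs.foldl (fun b i => b ++ g i) acc.flatten := by
  induction xs with
  | nil => intro acc; rfl
  | cons x xs ih =>
    intro acc
    simp only [List.foldl_cons]
    rw [ih, List.flatten_append]
    simp

-- ===== VERDICT (by name: the statement is the Claim_ definition above) =====
theorem convert_ascii_spec : Claim_equal_convert_ascii := by
  intro l _
  unfold Spec_convert_ascii convert_ascii convert_ascii_alt
  rw [flatten_foldl]
  congr 1
  simp only [List.flatten_nil]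
  apply List.foldl_ext
  intro b i _
  simp only [pvZfill8, pvBitsOf_eq, pvHexToNat_pvHexStr, List.append_assoc]
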